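-- pv_equiv track=rewrite | github.com/ChanatpakornS/Chula-CP-Courses | CU_AlgorithmDesign/a64_q2_two_mcs/file.py | f
-- ===== SOURCE A (Python) =====
-- def f(l):
-- 	s=0
-- 	al=[0]
-- 	for i in l:
-- 		s+=i
-- 		if s<0:s=0
-- 		al.append(max(al[-1],s))
-- 	return al[1:]
-- ===== SOURCE B (Python) =====
-- def f(l):
--     # prefix-sum / running-minimum formulation of max-subarray:
--     # answer[k] = max(0, P[j] - min_{i<=j} P[i] for j <= k+1), no clipped sum, no reset.
--     out = []
--     p = 0      # prefix sum
--     mn = 0     # minimum prefix sum seen so far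
--     best = 0   # best subarray sum so far (empty allowed -> 0)
--     for x in l:
--         p += x
--         if p < mn:
--             mn = p
--         if p - mn > best:
--             best = p - mn
--         out.append(best)
--     return out
-- ===== Notes on version B (the rewrite author's own statement) =====
-- stated objective: alternative
-- what changed: Replaced A's Kadane-style clipped running sum (reset to 0 when negative, then running max of it) by the prefix-sum formulation: maintain the unclipped prefix sum and its running minimum, the answer at each position being the best difference p - min_prefix seen so far.
import Mathlib
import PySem

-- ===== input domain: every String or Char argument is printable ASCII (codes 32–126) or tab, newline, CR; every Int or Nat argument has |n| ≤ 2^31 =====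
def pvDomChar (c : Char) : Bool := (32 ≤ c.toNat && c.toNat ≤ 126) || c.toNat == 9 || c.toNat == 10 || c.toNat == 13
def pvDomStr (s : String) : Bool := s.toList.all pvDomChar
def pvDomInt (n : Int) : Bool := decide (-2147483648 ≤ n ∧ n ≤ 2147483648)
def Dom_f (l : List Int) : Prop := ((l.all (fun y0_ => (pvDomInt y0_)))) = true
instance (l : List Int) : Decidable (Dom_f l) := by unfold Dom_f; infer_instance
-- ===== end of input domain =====

-- B replaces A's clipped running sum (Kadane reset) by unclipped prefix sums with a running minimum;
-- same O(n) cost, a genuinely different invariant (alternative).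

-- ===== PORT A =====
-- one pass: state (s, al); al[-1] ported as getLastD 0 (al is always nonempty), al[1:] as drop 1
def f (l : List Int) : List Int :=
  (l.foldl (fun (st : Int × List Int) i =>
      let s := st.1 + i
      let s := if s < 0 then (0 : Int) else s
      (s, st.2 ++ [max (st.2.getLastD 0) s]))
    (0, [0])).2.drop 1

-- ===== PORT B =====
-- state (p, mn, best, out): prefix sum, running min prefix sum, best difference so far, output
def f_alt (l : List Int) : List Int :=
  (l.foldl (fun (st : Int × Int × Int × List Int) x =>
      let p := st.1 + x
      let mn := if p < st.2.1 then p else st.2.1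
      let best := if p - mn > st.2.2.1 then p - mn else st.2.2.1
      (p, mn, best, st.2.2.2 ++ [best]))
    (0, 0, 0, [])).2.2.2

-- ===== PRECONDITION & SPEC =====
def Spec_f (l : List Int) (out : List Int) : Prop := out = f_alt l
instance (l : List Int) (out : List Int) : Decidable (Spec_f l out) := by unfold Spec_f; infer_instance

-- ===== CLAIM (what is proved, stated in full; the proofs are below) =====
def Claim_equal_f : Prop := ∀ (l : List Int), Dom_f l → Spec_f l (f l)

-- ===== LEMMAS AND PROOFS =====

-- B's output list only accumulates: the accumulator can be pulled out front
lemma b_out_acc (l : List Int) : ∀ (p mn best : Int) (acc : List Int),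
    (l.foldl (fun (st : Int × Int × Int × List Int) x =>
        let p := st.1 + x
        let mn := if p < st.2.1 then p else st.2.1
        let best := if p - mn > st.2.2.1 then p - mn else st.2.2.1
        (p, mn, best, st.2.2.2 ++ [best])) (p, mn, best, acc)).2.2.2
    = acc ++ (l.foldl (fun (st : Int × Int × Int × List Int) x =>
        let p := st.1 + x
        let mn := if p < st.2.1 then p else st.2.1
        let best := if p - mn > st.2.2.1 then p - mn else st.2.2.1
        (p, mn, best, st.2.2.2 ++ [best])) (p, mn, best, [])).2.2.2 := by
  induction l with
  | nil => intro p mn best acc; simp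
  | cons x xs ih =>
      intro p mn best acc
      simp only [List.foldl_cons]
      rw [ih, ih _ _ _ ([] ++ _)]
      simp

-- main invariant: if A's clipped sum s equals p - mn, the tails produced agree
lemma loops_agree (l : List Int) : ∀ (s p mn m : Int) (pre : List Int), s = p - mn →
    (l.foldl (fun (st : Int × List Int) i =>
        let s := st.1 + i
        let s := if s < 0 then (0 : Int) else s
        (s, st.2 ++ [max (st.2.getLastD 0) s]))
      (s, pre ++ [m])).2
    = (pre ++ [m]) ++ (l.foldl (fun (st : Int × Int × Int × List Int) x =>
        let p := st.1 + x
        let mn := if p < st.2.1 then p else st.2.1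
        let best := if p - mn > st.2.2.1 then p - mn else st.2.2.1
        (p, mn, best, st.2.2.2 ++ [best])) (p, mn, m, [])).2.2.2 := by
  induction l with
  | nil => intro s p mn m pre _; simp
  | cons x xs ih =>
      intro s p mn m pre hs
      simp only [List.foldl_cons, List.getLastD_concat]
      set p' := p + x with hp'
      by_cases hneg : s + x < 0
      · have hmn : p' < mn := by omega
        have hzero : p' - p' = (0 : Int) := by ring
        rw [if_pos hneg, if_pos hmn]
        have hm : (if p' - p' > m then p' - p' else m) = max m (0 : Int) := by
          rw [hzero]; omega
        rw [hm]
        have := ih 0 p' p' (max m 0) (pre ++ [m]) (by ring)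
        rw [List.append_assoc] at this ⊢
        rw [this, b_out_acc _ _ _ _ ([] ++ [max m 0])]
        simp [max_comm]
      · have hmn : ¬ p' < mn := by omega
        rw [if_neg hneg, if_neg hmn]
        have hm : (if p' - mn > m then p' - mn else m) = max m (s + x) := by omega
        rw [hm]
        have := ih (s + x) p' mn (max m (s + x)) (pre ++ [m]) (by omega)
        rw [List.append_assoc] at this ⊢
        rw [this, b_out_acc _ _ _ _ ([] ++ [max m (s + x)])]
        simp [max_comm]

-- ===== VERDICT (by name: the statement is the Claim_ definition above) =====
theorem f_spec : Claim_equal_f := by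
  intro l _
  show f l = f_alt l
  unfold f f_alt
  have h := loops_agree l 0 0 0 0 [] (by ring)
  rw [List.nil_append] at h
  rw [h]
  simp
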